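-- pv_equiv track=rewrite | github.com/kshitij2k4/studymatgen | youtube-summarizer/app.py | format_study_material
-- ===== SOURCE A (Python) =====
-- def format_study_material(sections: dict, topic_title: str) -> str:
--     """Format study material sections into markdown"""
--     content = f"# {topic_title}\n\n"
--
--     if 'overview' in sections:
--         content += f"## Overview\n{sections['overview']}\n\n"
--
--     if 'learning_outcomes' in sections:
--         content += f"## Learning Outcomes\n{sections['learning_outcomes']}\n\n"
--
--     if any(key in sections for key in ['concept_explanation', 'examples']):
--         content += "## Main Content\n\n"
--
--         if 'concept_explanation' in sections:
--             content += f"### Concept Explanation\n{sections['concept_explanation']}\n\n"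
--
--         if 'examples' in sections:
--             content += f"### Examples\n{sections['examples']}\n\n"
--
--     if 'key_takeaways' in sections:
--         content += f"## Key Takeaways\n{sections['key_takeaways']}\n\n"
--
--     if any(key in sections for key in ['practice_exercises', 'quiz_questions']):
--         content += "## Learning Activities\n\n"
--
--         if 'practice_exercises' in sections:
--             content += f"### Practice Exercises\n{sections['practice_exercises']}\n\n"
--
--         if 'quiz_questions' in sections:
--             content += f"### Quiz Questions\n{sections['quiz_questions']}\n\n"
--
--     content += "---\n*Generated using AI-powered YouTube Summarizer*\n"
--     return content
-- ===== SOURCE B (Python) =====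
-- # Recursive tree renderer: nodes render to fragment lists (a group's header is
-- # emitted iff its rendered children are nonempty); result is "".join of fragments.
-- _TREE = [
--     ("leaf", "overview", "## Overview"),
--     ("leaf", "learning_outcomes", "## Learning Outcomes"),
--     ("group", "## Main Content", [("concept_explanation", "### Concept Explanation"),
--                                   ("examples", "### Examples")]),
--     ("leaf", "key_takeaways", "## Key Takeaways"),
--     ("group", "## Learning Activities", [("practice_exercises", "### Practice Exercises"),
--                                          ("quiz_questions", "### Quiz Questions")]),
-- ]
--
--
-- def _leaf(sections, key, heading):
--     return [f"{heading}\n{sections[key]}\n\n"] if key in sections else []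
--
--
-- def _render(sections, node):
--     if node[0] == "leaf":
--         return _leaf(sections, node[1], node[2])
--     heading, children = node[1], node[2]
--     parts = [frag for k, h in children for frag in _leaf(sections, k, h)]
--     return [heading + "\n\n"] + parts if parts else []
--
--
-- def format_study_material(sections: dict, topic_title: str) -> str:
--     fragments = [f"# {topic_title}\n\n"]
--     for node in _TREE:
--         fragments += _render(sections, node)
--     fragments.append("---\n*Generated using AI-powered YouTube Summarizer*\n")
--     return "".join(fragments)
-- ===== Notes on version B (the rewrite author's own statement) =====
-- stated objective: alternative
-- what changed: Replaces the if-cascade with mutable string accumulation by a tree of section nodes rendered recursively to fragment lists (a group's header appears iff its rendered children list is nonempty) that are joined at the end.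
import Mathlib
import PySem

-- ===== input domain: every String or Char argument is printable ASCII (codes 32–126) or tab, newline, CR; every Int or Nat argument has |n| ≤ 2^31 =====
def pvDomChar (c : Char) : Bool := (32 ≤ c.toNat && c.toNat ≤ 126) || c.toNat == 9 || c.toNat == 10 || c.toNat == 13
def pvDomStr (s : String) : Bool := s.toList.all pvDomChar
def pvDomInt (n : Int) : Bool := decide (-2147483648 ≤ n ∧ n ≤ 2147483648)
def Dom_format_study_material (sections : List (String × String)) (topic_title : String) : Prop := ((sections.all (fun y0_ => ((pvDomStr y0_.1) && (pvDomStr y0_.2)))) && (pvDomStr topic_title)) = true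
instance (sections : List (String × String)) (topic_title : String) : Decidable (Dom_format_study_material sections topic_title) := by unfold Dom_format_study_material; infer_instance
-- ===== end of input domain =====

-- B renders a tree of section nodes to fragment lists joined at the end, instead of A's if-cascade with string accumulation (alternative decomposition, same cost).

-- dict lookup (first match in the association list), shared by both ports
def pvLook (sections : List (String × String)) (k : String) : Option String :=
  (sections.find? (fun p => p.1 == k)).map (·.2)

-- ===== PORT A =====
def format_study_material (sections : List (String × String)) (topic_title : String) : String :=
  let content := "# " ++ topic_title ++ "\n\n"
  let content := match pvLook sections "overview" with
    | some v => content ++ ("## Overview\n" ++ v ++ "\n\n")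
    | none => content
  let content := match pvLook sections "learning_outcomes" with
    | some v => content ++ ("## Learning Outcomes\n" ++ v ++ "\n\n")
    | none => content
  let content :=
    if (pvLook sections "concept_explanation").isSome || (pvLook sections "examples").isSome then
      let content := content ++ "## Main Content\n\n"
      let content := match pvLook sections "concept_explanation" with
        | some v => content ++ ("### Concept Explanation\n" ++ v ++ "\n\n")
        | none => content
      let content := match pvLook sections "examples" with
        | some v => content ++ ("### Examples\n" ++ v ++ "\n\n")
        | none => content
      content
    else content
  let content := match pvLook sections "key_takeaways" with
    | some v => content ++ ("## Key Takeaways\n" ++ v ++ "\n\n")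
    | none => content
  let content :=
    if (pvLook sections "practice_exercises").isSome || (pvLook sections "quiz_questions").isSome then
      let content := content ++ "## Learning Activities\n\n"
      let content := match pvLook sections "practice_exercises" with
        | some v => content ++ ("### Practice Exercises\n" ++ v ++ "\n\n")
        | none => content
      let content := match pvLook sections "quiz_questions" with
        | some v => content ++ ("### Quiz Questions\n" ++ v ++ "\n\n")
        | none => content
      content
    else content
  content ++ "---\n*Generated using AI-powered YouTube Summarizer*\n"

-- ===== PORT B =====
-- the section tree: leaf key heading | group heading children (children are leaf (key, heading) pairs)
inductive PvNode where
  | leaf : String → String → PvNode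
  | group : String → List (String × String) → PvNode
deriving Repr

def pvTree : List PvNode :=
  [ .leaf "overview" "## Overview",
    .leaf "learning_outcomes" "## Learning Outcomes",
    .group "## Main Content" [("concept_explanation", "### Concept Explanation"),
                              ("examples", "### Examples")],
    .leaf "key_takeaways" "## Key Takeaways",
    .group "## Learning Activities" [("practice_exercises", "### Practice Exercises"),
                                     ("quiz_questions", "### Quiz Questions")] ]

-- _leaf: the fragment list of one leaf section (empty iff the key is absent)
def pvLeaf (sections : List (String × String)) (key heading : String) : List String :=
  match pvLook sections key with
  | some v => [heading ++ "\n" ++ v ++ "\n\n"]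
  | none => []

-- _render: a node's fragment list; a group's header appears iff its children rendered nonempty
def pvRender (sections : List (String × String)) (node : PvNode) : List String :=
  match node with
  | .leaf key heading => pvLeaf sections key heading
  | .group heading children =>
      let parts := children.flatMap (fun kh => pvLeaf sections kh.1 kh.2)
      if parts = [] then [] else (heading ++ "\n\n") :: parts

def format_study_material_alt (sections : List (String × String)) (topic_title : String) : String :=
  let fragments := pvTree.foldl (fun fs node => fs ++ pvRender sections node)
    ["# " ++ topic_title ++ "\n\n"]
  String.join (fragments ++ ["---\n*Generated using AI-powered YouTube Summarizer*\n"])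

-- ===== PRECONDITION & SPEC =====
def Spec_format_study_material (sections : List (String × String)) (topic_title : String) (out : String) : Prop := out = format_study_material_alt sections topic_title
instance (sections : List (String × String)) (topic_title : String) (out : String) : Decidable (Spec_format_study_material sections topic_title out) := by unfold Spec_format_study_material; infer_instance

-- ===== CLAIM (what is proved, stated in full; the proofs are below) =====
def Claim_equal_format_study_material : Prop := ∀ (sections : List (String × String)) (topic_title : String), Dom_format_study_material sections topic_title → Spec_format_study_material sections topic_title (format_study_material sections topic_title)

-- ===== LEMMAS AND PROOFS =====

-- ===== VERDICT (by name: the statement is the Claim_ definition above) =====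
theorem format_study_material_spec : Claim_equal_format_study_material := by
  intro sections topic_title _
  unfold Spec_format_study_material format_study_material format_study_material_alt pvTree
  simp only [List.foldl, pvRender, pvLeaf, List.flatMap]
  cases h1 : pvLook sections "overview" <;>
  cases h2 : pvLook sections "learning_outcomes" <;>
  cases h3 : pvLook sections "concept_explanation" <;>
  cases h4 : pvLook sections "examples" <;>
  cases h5 : pvLook sections "key_takeaways" <;>
  cases h6 : pvLook sections "practice_exercises" <;>
  cases h7 : pvLook sections "quiz_questions" <;>
  (simp_all [String.join, ← String.append_assoc]; try rfl)
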